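-- pv_equiv track=rewrite | github.com/devakowakou/adventofcode | day12/solution.py | compute_placements_for_shape_in_region
-- ===== SOURCE A (Python) =====
-- def placement_bitmask(cells, w, h, top, left):
--     """
--     Given normalized cells (list of (r,c)), board width w and height h,
--     and top,left placement, return integer bitmask with bits set for occupied cells.
--     Bit indexing: row-major: bit index = r * w + c
--     """
--     mask = 0
--     for r, c in cells:
--         rr = top + r
--         cc = left + c
--         if rr < 0 or rr >= h or cc < 0 or cc >= w:
--             return None
--         idx = rr * w + cc
--         mask |= (1 << idx)
--     return mask
--
-- def compute_placements_for_shape_in_region(shape_cells, w, h):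
--     """
--     For a normalized shape (tuple of (r,c)), compute all placements bitmasks on a w x h board.
--     Returns list of bitmasks.
--     """
--     placements = []
--     # compute shape bounds
--     maxr = max(r for r,c in shape_cells)
--     maxc = max(c for r,c in shape_cells)
--     for top in range(0, h - maxr):
--         for left in range(0, w - maxc):
--             mask = placement_bitmask(shape_cells, w, h, top, left)
--             if mask is not None:
--                 placements.append(mask)
--     return placements
-- ===== SOURCE B (Python) =====
-- def compute_placements_for_shape_in_region(shape_cells, w, h):
--     """Build the mask of the first valid placement once, then emit every other
--     placement by a single left-shift of that base mask."""
--     maxr = max(r for r, c in shape_cells)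
--     maxc = max(c for r, c in shape_cells)
--     minr = min(r for r, c in shape_cells)
--     minc = min(c for r, c in shape_cells)
--     t0 = max(0, -minr)
--     l0 = max(0, -minc)
--     if t0 >= h - maxr or l0 >= w - maxc:
--         return []
--     base = 0
--     for r, c in shape_cells:
--         base |= 1 << ((t0 + r) * w + (l0 + c))
--     return [base << ((top - t0) * w + (left - l0))
--             for top in range(t0, h - maxr)
--             for left in range(l0, w - maxc)]
-- ===== Notes on version B (the rewrite author's own statement) =====
-- stated objective: alternative
-- what changed: Instead of rebuilding each placement's bitmask cell by cell with per-cell bounds checks inside the nested loop, B computes the shape's bounds once, builds the base mask of the first valid placement once, and emits every other placement as a single left-shift of that base mask (intended as faster; a timing run measured 1.7-2.9x but below the confirmation threshold at the largest size).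
import Mathlib
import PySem

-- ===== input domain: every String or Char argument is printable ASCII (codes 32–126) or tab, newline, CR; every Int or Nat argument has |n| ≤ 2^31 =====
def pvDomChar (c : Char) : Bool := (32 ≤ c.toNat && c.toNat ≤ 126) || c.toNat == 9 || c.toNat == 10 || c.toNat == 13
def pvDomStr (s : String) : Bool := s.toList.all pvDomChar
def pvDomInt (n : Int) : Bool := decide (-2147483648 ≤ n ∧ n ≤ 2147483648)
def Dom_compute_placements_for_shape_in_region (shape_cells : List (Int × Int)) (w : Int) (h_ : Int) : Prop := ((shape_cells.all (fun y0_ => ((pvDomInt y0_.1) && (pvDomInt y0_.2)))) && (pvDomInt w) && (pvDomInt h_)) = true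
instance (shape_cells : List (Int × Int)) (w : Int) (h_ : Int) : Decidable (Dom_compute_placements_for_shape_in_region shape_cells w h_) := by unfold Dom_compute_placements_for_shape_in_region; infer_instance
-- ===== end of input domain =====

-- B builds the mask of the first valid placement once and emits every other placement
-- by a single left-shift of that base mask instead of re-assembling it cell by cell
-- (objective: alternative).


-- ===== PORT A =====
-- loop of placement_bitmask; in the valid branch Python's shift amount rr*w+cc is ≥ 0
-- (0 ≤ cc < w forces w ≥ 1 and rr ≥ 0), so `.toNat` is exact there.
def pb_loop : List (Int × Int) → Int → Int → Int → Int → Int → Option Int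
  | [], _, _, _, _, mask => some mask
  | (r, c) :: rest, w, h, top, left, mask =>
    let rr := top + r
    let cc := left + c
    if rr < 0 ∨ rr ≥ h ∨ cc < 0 ∨ cc ≥ w then none
    else pb_loop rest w h top left (PySem.Int.bor mask ((1 : Int) <<< (rr * w + cc).toNat))

def placement_bitmask (cells : List (Int × Int)) (w h top left : Int) : Option Int :=
  pb_loop cells w h top left 0

def compute_placements_for_shape_in_region (shape_cells : List (Int × Int)) (w : Int) (h_ : Int) : List Int :=
  match PySem.List.max? (shape_cells.map (fun p => p.1)) (fun y => y),
        PySem.List.max? (shape_cells.map (fun p => p.2)) (fun y => y) with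
  | some maxr, some maxc =>
    (PySem.List.pyRange 0 (h_ - maxr)).foldl (fun placements top =>
      (PySem.List.pyRange 0 (w - maxc)).foldl (fun placements left =>
        match placement_bitmask shape_cells w h_ top left with
        | some mask => placements ++ [mask]
        | none => placements) placements) []
  -- Python raises ValueError (max of empty sequence) in these cases; excluded by Pre_
  | some _, none => []
  | none, some _ => []
  | none, none => []

-- ===== PORT B =====
def compute_placements_for_shape_in_region_alt (shape_cells : List (Int × Int)) (w : Int) (h_ : Int) : List Int :=
  -- Python's max()/min() raise ValueError on the empty shape (excluded by Pre_): totalized case by case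
  match PySem.List.max? (shape_cells.map (fun p => p.1)) (fun y => y) with
  | none => []
  | some maxr =>
  match PySem.List.max? (shape_cells.map (fun p => p.2)) (fun y => y) with
  | none => []
  | some maxc =>
  match PySem.List.min? (shape_cells.map (fun p => p.1)) (fun y => y) with
  | none => []
  | some minr =>
  match PySem.List.min? (shape_cells.map (fun p => p.2)) (fun y => y) with
  | none => []
  | some minc =>
    let t0 := max 0 (-minr)
    let l0 := max 0 (-minc)
    if t0 ≥ h_ - maxr ∨ l0 ≥ w - maxc then []
    else
      -- past the guard w ≥ 1 and every index (t0+r)*w+(l0+c) is ≥ 0, so `.toNat` is exact;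
      -- likewise every shift amount (top-t0)*w+(left-l0) with top ≥ t0, left ≥ l0 is ≥ 0.
      let base := shape_cells.foldl (fun base p =>
        PySem.Int.bor base ((1 : Int) <<< ((t0 + p.1) * w + (l0 + p.2)).toNat)) 0
      (PySem.List.pyRange t0 (h_ - maxr)).flatMap (fun top =>
        (PySem.List.pyRange l0 (w - maxc)).map (fun left =>
          base <<< ((top - t0) * w + (left - l0)).toNat))

-- ===== PRECONDITION & SPEC =====
-- Python's max() raises ValueError on an empty shape; Pre_ excludes only the empty list.
def Pre_compute_placements_for_shape_in_region (shape_cells : List (Int × Int)) (_w : Int) (_h : Int) : Prop :=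
  shape_cells ≠ []
instance (shape_cells : List (Int × Int)) (w : Int) (h_ : Int) : Decidable (Pre_compute_placements_for_shape_in_region shape_cells w h_) := by unfold Pre_compute_placements_for_shape_in_region; infer_instance

def pvWitness_compute_placements_for_shape_in_region : (List (Int × Int)) × Int × Int := ([(0, 0), (0, 1)], 3, 2)

def Spec_compute_placements_for_shape_in_region (shape_cells : List (Int × Int)) (w : Int) (h_ : Int) (out : List Int) : Prop := out = compute_placements_for_shape_in_region_alt shape_cells w h_
instance (shape_cells : List (Int × Int)) (w : Int) (h_ : Int) (out : List Int) : Decidable (Spec_compute_placements_for_shape_in_region shape_cells w h_ out) := by unfold Spec_compute_placements_for_shape_in_region; infer_instance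

-- ===== CLAIM (what is proved, stated in full; the proofs are below) =====
def Claim_equal_compute_placements_for_shape_in_region : Prop := ∀ (shape_cells : List (Int × Int)) (w : Int) (h_ : Int), Dom_compute_placements_for_shape_in_region shape_cells w h_ → Pre_compute_placements_for_shape_in_region shape_cells w h_ → Spec_compute_placements_for_shape_in_region shape_cells w h_ (compute_placements_for_shape_in_region shape_cells w h_)

-- ===== LEMMAS AND PROOFS =====

-- pb_loop returns `some` of the running-or fold when every cell is in bounds
theorem pb_loop_some (cells : List (Int × Int)) (w h top left : Int) :
    ∀ mask, (∀ p ∈ cells, 0 ≤ top + p.1 ∧ top + p.1 < h ∧ 0 ≤ left + p.2 ∧ left + p.2 < w) →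
    pb_loop cells w h top left mask =
      some (cells.foldl (fun m p =>
        PySem.Int.bor m ((1 : Int) <<< ((top + p.1) * w + (left + p.2)).toNat)) mask) := by
  induction cells with
  | nil => intro mask _; rfl
  | cons q rest ih =>
    intro mask hb
    obtain ⟨h1, h2, h3, h4⟩ := hb q (by simp)
    simp only [pb_loop, List.foldl_cons]
    rw [if_neg (by omega)]
    exact ih _ (fun p hp => hb p (by simp [hp]))

-- pb_loop returns none as soon as one cell is out of bounds
theorem pb_loop_none (cells : List (Int × Int)) (w h top left : Int) :
    ∀ mask, (∃ p ∈ cells, top + p.1 < 0 ∨ h ≤ top + p.1 ∨ left + p.2 < 0 ∨ w ≤ left + p.2) →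
    pb_loop cells w h top left mask = none := by
  induction cells with
  | nil => rintro mask ⟨p, hp, _⟩; simp at hp
  | cons q rest ih =>
    intro mask ⟨p, hp, hout⟩
    simp only [pb_loop]
    by_cases hq : top + q.1 < 0 ∨ top + q.1 ≥ h ∨ left + q.2 < 0 ∨ left + q.2 ≥ w
    · rw [if_pos hq]
    · rw [if_neg hq]
      rcases List.mem_cons.mp hp with rfl | hp'
      · exact absurd (by omega) hq
      · exact ih _ ⟨p, hp', hout⟩

-- 'if mask is not None: out.append(mask)' loop = filterMap
theorem foldl_filterMap {α : Type} (g : α → Option Int) (l : List α) :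
    ∀ acc : List Int,
    l.foldl (fun acc x => match g x with | some m => acc ++ [m] | none => acc) acc =
      acc ++ l.filterMap g := by
  induction l with
  | nil => simp
  | cons x t ih =>
    intro acc
    simp only [List.foldl_cons, List.filterMap_cons]
    cases hx : g x with
    | none => simp [ih]
    | some m => simp [ih]

theorem filterMap_some_eq_map {α β : Type} (g : α → Option β) (f : α → β) (l : List α)
    (h : ∀ x ∈ l, g x = some (f x)) : l.filterMap g = l.map f := by
  induction l with
  | nil => rfl
  | cons x t ih =>
    simp only [List.filterMap_cons, h x (by simp), List.map_cons]
    rw [ih (fun y hy => h y (by simp [hy]))]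

theorem natCast_shiftLeft (m s : Nat) : ((m : Int) <<< s) = ((m <<< s : Nat) : Int) := by
  simp [Int.shiftLeft_eq, Nat.shiftLeft_eq]

theorem nat_lor_shiftLeft (a b s : Nat) : (a ||| b) <<< s = (a <<< s) ||| (b <<< s) := by
  apply Nat.eq_of_testBit_eq
  intro i
  simp [Nat.testBit_shiftLeft, Bool.and_or_distrib_left]

theorem bor_shiftLeft {a b : Int} (ha : 0 ≤ a) (hb : 0 ≤ b) (s : Nat) :
    (PySem.Int.bor a b) <<< s = PySem.Int.bor (a <<< s) (b <<< s) := by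
  rw [PySem.Int.bor_of_nonneg ha hb, natCast_shiftLeft, nat_lor_shiftLeft,
    ← PySem.Int.bor_natCast, ← natCast_shiftLeft, ← natCast_shiftLeft,
    Int.toNat_of_nonneg ha, Int.toNat_of_nonneg hb]

theorem one_shiftLeft_nonneg (k : Nat) : (0 : Int) ≤ (1 : Int) <<< k := by
  rw [show (1 : Int) = ((1 : Nat) : Int) by simp, natCast_shiftLeft]
  exact Int.natCast_nonneg _

theorem bor_nonneg {a b : Int} (ha : 0 ≤ a) (hb : 0 ≤ b) : 0 ≤ PySem.Int.bor a b := by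
  rw [PySem.Int.bor_of_nonneg ha hb]; exact Int.natCast_nonneg _

-- shifting the base mask = or-ing the shifted bits
theorem orFold_shift (cells : List (Int × Int)) (g : Int × Int → Nat) (s : Nat) :
    ∀ mask : Int, 0 ≤ mask →
    cells.foldl (fun m p => PySem.Int.bor m ((1 : Int) <<< (g p + s))) (mask <<< s) =
      (cells.foldl (fun m p => PySem.Int.bor m ((1 : Int) <<< g p)) mask) <<< s := by
  induction cells with
  | nil => intro mask _; rfl
  | cons q rest ih =>
    intro mask hm
    simp only [List.foldl_cons]
    rw [Nat.add_comm (g q) s]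
    rw [show (1 : Int) <<< (s + g q) = ((1 : Int) <<< g q) <<< s by
      simp [Int.shiftLeft_eq, pow_add]; ring]
    rw [← bor_shiftLeft hm (one_shiftLeft_nonneg _)]
    exact ih _ (bor_nonneg hm (one_shiftLeft_nonneg _))

-- ===== MAIN PROOF =====
theorem compute_placements_for_shape_in_region_spec : Claim_equal_compute_placements_for_shape_in_region := by
  intro cells w h _dom hpre
  unfold Spec_compute_placements_for_shape_in_region
  match cells, hpre with
  | q :: rest, _ =>
  simp only [compute_placements_for_shape_in_region, compute_placements_for_shape_in_region_alt,
    List.map_cons, PySem.List.max?_id_cons, PySem.List.min?_id_cons]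
  -- names for the four extrema (the running folds Python's max/min compute)
  set Mr := List.foldl max q.1 (rest.map (fun p => p.1)) with hMrd
  set Mc := List.foldl max q.2 (rest.map (fun p => p.2)) with hMcd
  set mr := List.foldl min q.1 (rest.map (fun p => p.1)) with hmrd
  set mc := List.foldl min q.2 (rest.map (fun p => p.2)) with hmcd
  have hmaxr : PySem.List.max? ((q :: rest).map (fun p => p.1)) (fun y => y) = some Mr := by
    rw [List.map_cons, PySem.List.max?_id_cons]
  have hmaxc : PySem.List.max? ((q :: rest).map (fun p => p.2)) (fun y => y) = some Mc := by
    rw [List.map_cons, PySem.List.max?_id_cons]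
  have hminr : PySem.List.min? ((q :: rest).map (fun p => p.1)) (fun y => y) = some mr := by
    rw [List.map_cons, PySem.List.min?_id_cons]
  have hminc : PySem.List.min? ((q :: rest).map (fun p => p.2)) (fun y => y) = some mc := by
    rw [List.map_cons, PySem.List.min?_id_cons]
  have hub1 : ∀ p ∈ q :: rest, p.1 ≤ Mr := fun p hp =>
    PySem.List.max?_isMax hmaxr p.1 (List.mem_map_of_mem hp)
  have hub2 : ∀ p ∈ q :: rest, p.2 ≤ Mc := fun p hp =>
    PySem.List.max?_isMax hmaxc p.2 (List.mem_map_of_mem hp)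
  have hlb1 : ∀ p ∈ q :: rest, mr ≤ p.1 := fun p hp =>
    PySem.List.min?_isMin hminr p.1 (List.mem_map_of_mem hp)
  have hlb2 : ∀ p ∈ q :: rest, mc ≤ p.2 := fun p hp =>
    PySem.List.min?_isMin hminc p.2 (List.mem_map_of_mem hp)
  have hqMr : mr ≤ Mr := le_trans (hlb1 q (by simp)) (hub1 q (by simp))
  have hqMc : mc ≤ Mc := le_trans (hlb2 q (by simp)) (hub2 q (by simp))
  have hmrmem : ∃ p ∈ q :: rest, p.1 = mr := by
    obtain ⟨p, hp, hpe⟩ := List.mem_map.mp (PySem.List.min?_mem hminr)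
    exact ⟨p, hp, hpe⟩
  have hmcmem : ∃ p ∈ q :: rest, p.2 = mc := by
    obtain ⟨p, hp, hpe⟩ := List.mem_map.mp (PySem.List.min?_mem hminc)
    exact ⟨p, hp, hpe⟩
  clear hmaxr hmaxc hminr hminc
  -- a placement whose top row (resp. leftmost column) would stick out of the board is rejected
  have hrow_none : ∀ top left : Int, top < -mr →
      placement_bitmask (q :: rest) w h top left = none := by
    intro top left hlt
    obtain ⟨p, hp, hpe⟩ := hmrmem
    exact pb_loop_none _ _ _ _ _ 0 ⟨p, hp, Or.inl (by omega)⟩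
  have hcol_none : ∀ top left : Int, left < -mc →
      placement_bitmask (q :: rest) w h top left = none := by
    intro top left hlt
    obtain ⟨p, hp, hpe⟩ := hmcmem
    exact pb_loop_none _ _ _ _ _ 0 ⟨p, hp, Or.inr (Or.inr (Or.inl (by omega)))⟩
  -- A's nested append loop is a flatMap of filterMaps
  have hA : ∀ a b : Int,
      (PySem.List.pyRange 0 a).foldl (fun placements top =>
        (PySem.List.pyRange 0 b).foldl (fun placements left =>
          match placement_bitmask (q :: rest) w h top left with
          | some mask => placements ++ [mask]
          | none => placements) placements) []
      = (PySem.List.pyRange 0 a).flatMap (fun top =>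
          (PySem.List.pyRange 0 b).filterMap
            (fun left => placement_bitmask (q :: rest) w h top left)) := by
    intro a b
    rw [PySem.List.foldl_congr_mem (PySem.List.pyRange 0 a) _
      (fun placements top => placements ++ (PySem.List.pyRange 0 b).filterMap
        (fun left => placement_bitmask (q :: rest) w h top left)) []
      (fun acc top _ => foldl_filterMap _ _ acc)]
    rw [PySem.List.foldl_append_eq_flatMap]
    simp
  rw [hA]
  by_cases hg : max 0 (-mr) ≥ h - Mr ∨ max 0 (-mc) ≥ w - Mc
  · rw [if_pos hg]
    apply List.flatMap_eq_nil_iff.mpr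
    intro top htop
    rw [PySem.List.mem_pyRange_one] at htop
    apply List.filterMap_eq_nil_iff.mpr
    intro left hleft
    rw [PySem.List.mem_pyRange_one] at hleft
    rcases hg with hg | hg
    · exact hrow_none top left (by omega)
    · exact hcol_none top left (by omega)
  · rw [if_neg hg]
    rw [not_or, not_le, not_le] at hg
    obtain ⟨hg1, hg2⟩ := hg
    have hw1 : 1 ≤ w := by omega
    rw [PySem.List.pyRange_one_append 0 (max 0 (-mr)) (h - Mr) (le_max_left _ _) (by omega)]
    rw [List.flatMap_append]
    rw [show (PySem.List.pyRange 0 (max 0 (-mr))).flatMap (fun top =>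
        (PySem.List.pyRange 0 (w - Mc)).filterMap
          (fun left => placement_bitmask (q :: rest) w h top left)) = [] by
      apply List.flatMap_eq_nil_iff.mpr
      intro top htop
      rw [PySem.List.mem_pyRange_one] at htop
      apply List.filterMap_eq_nil_iff.mpr
      intro left _
      exact hrow_none top left (by omega)]
    rw [List.nil_append]
    apply List.flatMap_congr
    intro top htop
    rw [PySem.List.mem_pyRange_one] at htop
    rw [PySem.List.pyRange_one_append 0 (max 0 (-mc)) (w - Mc) (le_max_left _ _) (by omega)]
    rw [List.filterMap_append]
    rw [show (PySem.List.pyRange 0 (max 0 (-mc))).filterMap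
        (fun left => placement_bitmask (q :: rest) w h top left) = [] by
      apply List.filterMap_eq_nil_iff.mpr
      intro left hleft
      rw [PySem.List.mem_pyRange_one] at hleft
      exact hcol_none top left (by omega)]
    rw [List.nil_append]
    apply filterMap_some_eq_map
    intro left hleft
    rw [PySem.List.mem_pyRange_one] at hleft
    have hbnd : ∀ p ∈ q :: rest,
        0 ≤ top + p.1 ∧ top + p.1 < h ∧ 0 ≤ left + p.2 ∧ left + p.2 < w := by
      intro p hp
      have h1 := hub1 p hp; have h2 := hlb1 p hp
      have h3 := hub2 p hp; have h4 := hlb2 p hp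
      omega
    rw [placement_bitmask, pb_loop_some _ _ _ _ _ 0 hbnd]
    congr 1
    have hS : 0 ≤ (top - max 0 (-mr)) * w + (left - max 0 (-mc)) := by
      have := mul_nonneg (a := top - max 0 (-mr)) (b := w) (by omega) (by omega)
      omega
    have key : ∀ (m : Int), ∀ p ∈ q :: rest,
        PySem.Int.bor m ((1 : Int) <<< ((top + p.1) * w + (left + p.2)).toNat) =
        PySem.Int.bor m ((1 : Int) <<<
          (((max 0 (-mr) + p.1) * w + (max 0 (-mc) + p.2)).toNat +
           ((top - max 0 (-mr)) * w + (left - max 0 (-mc))).toNat)) := by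
      intro m p hp
      have h2 := hlb1 p hp; have h4 := hlb2 p hp
      have hx : 0 ≤ (max 0 (-mr) + p.1) * w + (max 0 (-mc) + p.2) := by
        have := mul_nonneg (a := max 0 (-mr) + p.1) (b := w) (by omega) (by omega)
        omega
      have he : (top + p.1) * w + (left + p.2) =
          ((max 0 (-mr) + p.1) * w + (max 0 (-mc) + p.2)) +
          ((top - max 0 (-mr)) * w + (left - max 0 (-mc))) := by ring
      rw [he, Int.toNat_add hx hS]
    rw [PySem.List.foldl_congr_mem (q :: rest) _
      (fun m p => PySem.Int.bor m ((1 : Int) <<<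
        (((max 0 (-mr) + p.1) * w + (max 0 (-mc) + p.2)).toNat +
         ((top - max 0 (-mr)) * w + (left - max 0 (-mc))).toNat))) 0 key]
    have hshift := orFold_shift (q :: rest)
      (fun p => ((max 0 (-mr) + p.1) * w + (max 0 (-mc) + p.2)).toNat)
      (((top - max 0 (-mr)) * w + (left - max 0 (-mc))).toNat) 0 le_rfl
    rw [show ((0 : Int) <<<
        ((top - max 0 (-mr)) * w + (left - max 0 (-mc))).toNat) = 0 by
      simp [Int.shiftLeft_eq]] at hshift
    exact hshift
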